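-- pv_equiv track=rewrite | github.com/raghavnauhria/parivartan | parivartan.py | reification_master
-- ===== SOURCE A (Python) =====
-- from typing import Set, Dict, List
-- import itertools
--
-- def reification_master(sort_name: str, sort_args: List[str], agent_dict: Dict[str, List[str]]) -> List[str]:
--     """
--     Function to reify the given sort, i.e. event/fluent, w.r.t the agents in the argument
--     :param sort_name:  name of the sort
--     :param sort_args:  list of arguments to the sort
--     :param agent_dict: dictionary of all agents, with agent_names as keys, which maps to instances as a list
--     :return: list of reified atoms
--     """
--     reification_prefix = sort_name                  # "load"
--
--     if len(sort_args) == 0: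
--         return [reification_prefix]
--     else:
--         result = []
--
--         agent_list = []  # list of lists
--         for agent in sort_args:
--             if agent in agent_dict.keys():
--                 agent_list.append(agent_dict[agent])
--             else:
--                 agent_list.append([agent])
--
--         for permutation in list(itertools.product(*agent_list)):
--             atom = reification_prefix + "_"         # "load_"
--
--             perm_list = list(permutation)
--             for x in perm_list:
--                 atom += x + "_"                     # "load_a1_a2_"
--
--             atom = atom[:-1]                        # "load_a1_a2"
--
--             result.append(atom)
--
--     return result
-- ===== SOURCE B (Python) =====
-- def reification_master(sort_name, sort_args, agent_dict):
--     result = [sort_name]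
--     for arg in sort_args:
--         instances = agent_dict[arg] if arg in agent_dict else [arg]
--         result = [prefix + "_" + inst for prefix in result for inst in instances]
--     return result
-- ===== Notes on version B (the rewrite author's own statement) =====
-- stated objective: simpler
-- what changed: Replaces the three-pass scheme (build agent_list, materialize the full itertools.product of tuples, then reformat every tuple into a string with an inner loop and a trailing-underscore chop) by a single expanding fold that grows each reified string directly, one argument at a time.
import Mathlib
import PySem

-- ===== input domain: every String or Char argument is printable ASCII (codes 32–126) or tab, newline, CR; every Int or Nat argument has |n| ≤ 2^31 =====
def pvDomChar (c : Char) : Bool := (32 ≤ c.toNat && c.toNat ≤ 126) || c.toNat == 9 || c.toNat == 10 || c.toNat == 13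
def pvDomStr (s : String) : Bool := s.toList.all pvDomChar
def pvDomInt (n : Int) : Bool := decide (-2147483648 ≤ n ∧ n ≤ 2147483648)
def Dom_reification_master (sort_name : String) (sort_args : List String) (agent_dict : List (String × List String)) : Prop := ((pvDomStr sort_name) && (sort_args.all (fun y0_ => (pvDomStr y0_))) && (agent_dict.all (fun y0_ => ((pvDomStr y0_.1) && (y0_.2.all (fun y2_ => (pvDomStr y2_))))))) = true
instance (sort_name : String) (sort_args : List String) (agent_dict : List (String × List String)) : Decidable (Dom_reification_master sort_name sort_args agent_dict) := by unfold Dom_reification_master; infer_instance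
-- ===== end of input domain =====

-- B replaces A's three passes (agent_list, full itertools.product of tuples, per-tuple string
-- rebuild with a trailing-underscore chop) by one expanding fold that grows each string directly.


-- ===== PORT A =====
-- itertools.product(*lists), leftmost factor varying slowest (exact on lists of lists)
def pyProduct (ls : List (List String)) : List (List String) :=
  match ls with
  | [] => [[]]
  | l :: rest => l.flatMap (fun x => (pyProduct rest).map (fun t => x :: t))

def reification_master (sort_name : String) (sort_args : List String) (agent_dict : List (String × List String)) : List String :=
  let reification_prefix := sort_name
  if sort_args.length == 0 then
    [reification_prefix]
  else
    -- agent_list: agent_dict[agent] if agent in agent_dict else [agent]  (dict lookup = first match)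
    let agent_list : List (List String) :=
      sort_args.foldl (fun acc agent =>
        acc ++ [match agent_dict.lookup agent with
                | some l => l
                | none => [agent]]) []
    pyProduct agent_list |>.foldl (fun result perm =>
      let atom := reification_prefix ++ "_"
      let atom := perm.foldl (fun a x => a ++ x ++ "_") atom
      let atom := PySem.Str.slice atom none (some (-1))   -- atom[:-1]
      result ++ [atom]) []

-- ===== PORT B =====
def reification_master_alt (sort_name : String) (sort_args : List String) (agent_dict : List (String × List String)) : List String :=
  sort_args.foldl (fun result arg =>
    let instances := match agent_dict.lookup arg with
                     | some l => l
                     | none => [arg]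
    result.flatMap (fun prefx => instances.map (fun inst => prefx ++ "_" ++ inst)))
    [sort_name]

-- ===== PRECONDITION & SPEC =====
def Spec_reification_master (sort_name : String) (sort_args : List String) (agent_dict : List (String × List String)) (out : List String) : Prop := out = reification_master_alt sort_name sort_args agent_dict
instance (sort_name : String) (sort_args : List String) (agent_dict : List (String × List String)) (out : List String) : Decidable (Spec_reification_master sort_name sort_args agent_dict out) := by unfold Spec_reification_master; infer_instance

-- ===== CLAIM (what is proved, stated in full; the proofs are below) =====
def Claim_equal_reification_master : Prop := ∀ (sort_name : String) (sort_args : List String) (agent_dict : List (String × List String)), Dom_reification_master sort_name sort_args agent_dict → Spec_reification_master sort_name sort_args agent_dict (reification_master sort_name sort_args agent_dict)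

-- ===== LEMMAS AND PROOFS =====

-- the per-argument instance list both programs use
def pvLook (agent_dict : List (String × List String)) (arg : String) : List String :=
  match agent_dict.lookup arg with
  | some l => l
  | none => [arg]

-- B's fold, characterized through pyProduct
theorem b_char (agent_dict : List (String × List String)) (args : List String) (R : List String) :
    args.foldl (fun result arg =>
        result.flatMap (fun prefx => (pvLook agent_dict arg).map (fun inst => prefx ++ "_" ++ inst))) R
    = R.flatMap (fun p => (pyProduct (args.map (pvLook agent_dict))).map (fun perm =>
        perm.foldl (fun a x => a ++ "_" ++ x) p)) := by
  induction args generalizing R with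
  | nil => simp [pyProduct]
  | cons a t ih =>
    simp only [List.foldl_cons, ih, List.map_cons, pyProduct, List.flatMap_assoc]
    congr 1
    funext p
    rw [List.flatMap_map, List.map_flatMap]
    congr 1
    funext x
    rw [List.map_map]
    simp [Function.comp_def]

-- A's inner string build equals B's, up to the trailing underscore A chops off
theorem a_atom (perm : List String) (s : String) :
    perm.foldl (fun a x => a ++ x ++ "_") (s ++ "_")
    = (perm.foldl (fun a x => a ++ "_" ++ x) s) ++ "_" := by
  induction perm generalizing s with
  | nil => rfl
  | cons y t ih =>
    simp only [List.foldl_cons]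
    rw [show (s ++ "_") ++ y ++ "_" = ((s ++ "_" ++ y) ++ "_") by rw [String.append_assoc]]
    exact ih (s ++ "_" ++ y)

theorem chop_underscore (s : String) : PySem.Str.slice (s ++ "_") none (some (-1)) = s := by
  apply String.toList_inj.mp
  rw [PySem.Str.slice_to_neg_one]
  simp [String.toList_append]

-- ===== VERDICT (by name: the statement is the Claim_ definition above) =====
theorem reification_master_spec : Claim_equal_reification_master := by
  intro sort_name sort_args agent_dict _
  unfold Spec_reification_master reification_master reification_master_alt
  simp only [show (fun (acc : List (List String)) (agent : String) =>
      acc ++ [match agent_dict.lookup agent with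
              | some l => l
              | none => [agent]]) = (fun acc agent => acc ++ [pvLook agent_dict agent]) from rfl]
  simp only [show (fun (result : List String) (arg : String) =>
      result.flatMap (fun prefx => (match agent_dict.lookup arg with
                       | some l => l
                       | none => [arg]).map (fun inst => prefx ++ "_" ++ inst)))
    = (fun result arg => result.flatMap (fun prefx => (pvLook agent_dict arg).map (fun inst => prefx ++ "_" ++ inst))) from rfl]
  rw [b_char]
  by_cases h : sort_args.length = 0
  · rcases List.eq_nil_of_length_eq_zero h with rfl
    simp [pyProduct]
  · simp only [beq_iff_eq, h, if_false]
    rw [PySem.List.foldl_append_singleton_eq_map, PySem.List.foldl_append_singleton_eq_map]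
    simp only [List.flatMap_cons, List.flatMap_nil, List.append_nil]
    apply List.map_congr_left
    intro perm _
    rw [a_atom, chop_underscore]
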